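-- pv_equiv track=rewrite | github.com/fairy-pitta/magazine-ocr | src/magazine_ocr/layout.py | _fill_to_target_rows
-- ===== SOURCE A (Python) =====
-- def _fill_to_target_rows(boundaries: list[int], target: int = 5) -> list[int]:
--     """Split the largest gaps until we reach the target row count."""
--     boundaries = sorted(set(boundaries))
--     while len(boundaries) - 1 < target:
--         # Find the largest gap
--         max_gap = 0
--         max_idx = 0
--         for i in range(len(boundaries) - 1):
--             gap = boundaries[i + 1] - boundaries[i]
--             if gap > max_gap:
--                 max_gap = gap
--                 max_idx = i
--         mid = (boundaries[max_idx] + boundaries[max_idx + 1]) // 2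
--         boundaries.insert(max_idx + 1, mid)
--     return boundaries
-- ===== SOURCE B (Python) =====
-- def _fill_to_target_rows(boundaries: list[int], target: int = 5) -> list[int]:
--     """Split the largest gaps until we reach the target row count.
--
--     Priority-queue formulation: keep the intervals in a list sorted by
--     (-gap, left); repeatedly pop the first (largest gap, leftmost) interval
--     and split it at its floor midpoint, re-inserting the two halves by
--     binary-search insertion instead of rescanning every gap per round.
--     """
--     bs = sorted(set(boundaries))
--     need = target - (len(bs) - 1)
--     if need <= 0:
--         return bs
--     pq = sorted((bs[i] - bs[i + 1], bs[i]) for i in range(len(bs) - 1))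
--     for _ in range(need):
--         neg, left = pq.pop(0)
--         right = left - neg
--         mid = (left + right) // 2
--         _insort(pq, (left - mid, left))
--         _insort(pq, (mid - right, mid))
--     return sorted(left for _, left in pq) + bs[-1:]
--
--
-- def _insort(a, item):
--     lo, hi = 0, len(a)
--     while lo < hi:
--         m = (lo + hi) // 2
--         if a[m] < item:
--             lo = m + 1
--         else:
--             hi = m
--     a.insert(lo, item)
-- ===== Notes on version B (the rewrite author's own statement) =====
-- stated objective: alternative
-- what changed: Instead of rescanning every gap per round and inserting into the boundary list, B keeps the intervals in a priority queue sorted by (-gap, left) - built with one sorted() call - popping the front interval and re-inserting its two halves by binary-search insertion, then rebuilds the boundary list with a final sort (intended to cut the per-round Python-level scan; measured about even on a timing run's input family).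
import Mathlib
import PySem

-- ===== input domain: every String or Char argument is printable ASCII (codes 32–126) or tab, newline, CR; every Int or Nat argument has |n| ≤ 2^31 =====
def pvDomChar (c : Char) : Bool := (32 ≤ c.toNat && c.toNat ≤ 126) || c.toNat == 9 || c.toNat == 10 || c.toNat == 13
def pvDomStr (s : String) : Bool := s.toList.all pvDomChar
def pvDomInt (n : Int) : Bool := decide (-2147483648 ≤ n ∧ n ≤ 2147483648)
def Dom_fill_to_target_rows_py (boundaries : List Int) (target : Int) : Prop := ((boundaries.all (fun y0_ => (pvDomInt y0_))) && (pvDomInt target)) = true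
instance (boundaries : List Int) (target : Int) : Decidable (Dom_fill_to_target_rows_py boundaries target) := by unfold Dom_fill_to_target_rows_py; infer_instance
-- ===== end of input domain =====

-- B replaces A's per-round rescan of all gaps with a priority queue: a list of
-- intervals kept sorted by (-gap, left), popped at the front and refilled by
-- binary-search insertion (objective: alternative algorithm).

-- ===== PORT A =====
-- the for-loop scanning for the largest gap: returns (max_gap, max_idx)
def aScan (bs : List Int) : Int × Nat :=
  (List.range (bs.length - 1)).foldl
    (fun s i =>
      let gap := bs.getD (i + 1) 0 - bs.getD i 0
      if s.1 < gap then (gap, i) else s) (0, 0)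

-- the while-loop of A; Python indexing raises only outside Pre_ (getD there)
def aLoop (bs : List Int) (target : Int) : List Int :=
  if _h : (bs.length : Int) - 1 < target then
    let s := aScan bs
    let mid := PySem.Int.floordiv (bs.getD s.2 0 + bs.getD (s.2 + 1) 0) 2
    aLoop (PySem.List.insert bs ((s.2 : Int) + 1) mid) target
  else bs
termination_by ((target + 1) - (bs.length : Int)).toNat
decreasing_by simp only [PySem.List.length_insert]; omega

def fill_to_target_rows_py (boundaries : List Int) (target : Int) : List Int :=
  aLoop (PySem.List.sorted (PySem.Set.ofList boundaries) (fun x => x) false) target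

-- ===== PORT B =====
-- Python tuple/int '<' used by _insort
def pyPairLt (p q : Int × Int) : Bool := p.1 < q.1 || (p.1 == q.1 && p.2 < q.2)

-- the while-loop of _insort (binary search for the insertion point)
def insortIdx {α : Type} (lt : α → α → Bool) (a : List α) (d : α) (item : α)
    (lo hi : Nat) : Nat :=
  if lo < hi then
    let m := (lo + hi) / 2
    if lt (a.getD m d) item then insortIdx lt a d item (m + 1) hi
    else insortIdx lt a d item lo m
  else lo
termination_by hi - lo
decreasing_by all_goals omega

-- _insort(a, item)
def insortBy {α : Type} (lt : α → α → Bool) (d : α) (a : List α) (item : α) : List α :=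
  PySem.List.insert a ((insortIdx lt a d item 0 a.length : Nat) : Int) item

-- the 'for _ in range(need)' splitting loop of B
def bLoop : Nat → List (Int × Int) → List (Int × Int)
  | 0, pq => pq
  | n + 1, pq =>
    match pq with
    | [] => []   -- Python's pq.pop(0) raises here; such inputs are outside Pre_
    | (neg, left) :: rest =>
      let right := left - neg
      let mid := PySem.Int.floordiv (left + right) 2
      bLoop n (insortBy pyPairLt (0, 0)
                 (insortBy pyPairLt (0, 0) rest (left - mid, left)) (mid - right, mid))

def fill_to_target_rows_py_alt (boundaries : List Int) (target : Int) : List Int :=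
  let bs := PySem.List.sorted (PySem.Set.ofList boundaries) (fun x => x) false
  let need := target - ((bs.length : Int) - 1)
  if need ≤ 0 then bs
  else
    let pq := PySem.List.sorted2 ((List.range (bs.length - 1)).map
      (fun i => (bs.getD i 0 - bs.getD (i + 1) 0, bs.getD i 0))) Prod.fst Prod.snd false
    let pqf := bLoop need.toNat pq
    let out := PySem.List.sorted (pqf.map Prod.snd) (fun x => x) false
    out ++ PySem.List.slice bs (some (-1)) none

-- ===== PRECONDITION & SPEC =====
-- Pre_ excludes exactly the inputs on which A raises IndexError: fewer than two
-- distinct boundary values while more rows are still needed.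
def Pre_fill_to_target_rows_py (boundaries : List Int) (target : Int) : Prop :=
  2 ≤ (PySem.Set.ofList boundaries).length ∨
  target ≤ ((PySem.Set.ofList boundaries).length : Int) - 1

instance (boundaries : List Int) (target : Int) :
    Decidable (Pre_fill_to_target_rows_py boundaries target) := by
  unfold Pre_fill_to_target_rows_py; infer_instance

def pvWitness_fill_to_target_rows_py : List Int × Int := ([0, 10], 4)

def Spec_fill_to_target_rows_py (boundaries : List Int) (target : Int) (out : List Int) : Prop := out = fill_to_target_rows_py_alt boundaries target
instance (boundaries : List Int) (target : Int) (out : List Int) : Decidable (Spec_fill_to_target_rows_py boundaries target out) := by unfold Spec_fill_to_target_rows_py; infer_instance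

-- ===== CLAIM (what is proved, stated in full; the proofs are below) =====
def Claim_equal_fill_to_target_rows_py : Prop := ∀ (boundaries : List Int) (target : Int), Dom_fill_to_target_rows_py boundaries target → Pre_fill_to_target_rows_py boundaries target → Spec_fill_to_target_rows_py boundaries target (fill_to_target_rows_py boundaries target)

-- ===== LEMMAS AND PROOFS =====

-- the list of adjacent intervals of a boundary list, as B's (-gap, left) pairs
def gpairs : List Int → List (Int × Int)
  | a :: b :: t => (a - b, a) :: gpairs (b :: t)
  | _ => []

-- the (non-strict) order pyPairLt is the strict part of
def pairLe (p q : Int × Int) : Prop := p.1 < q.1 ∨ (p.1 = q.1 ∧ p.2 ≤ q.2)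

lemma pyPairLt_false_iff (p q : Int × Int) : pyPairLt q p = false ↔ pairLe p q := by
  simp [pyPairLt, pairLe]; omega

lemma pairLe_trans {p q r : Int × Int} (h1 : pairLe p q) (h2 : pairLe q r) : pairLe p r := by
  rcases h1 with h | ⟨h, h'⟩ <;> rcases h2 with g | ⟨g, g'⟩ <;>
    simp_all [pairLe] <;> omega

lemma pairLe_refl (p : Int × Int) : pairLe p p := Or.inr ⟨rfl, le_refl _⟩

lemma pyPairLt_irrefl (p : Int × Int) : pyPairLt p p = false := by simp [pyPairLt]

lemma pairLe_total (p q : Int × Int) : pairLe p q ∨ pairLe q p := by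
  simp [pairLe]; omega

lemma pairLe_antisymm {p q : Int × Int} (h1 : pairLe p q) (h2 : pairLe q p) : p = q := by
  rcases p with ⟨a, b⟩; rcases q with ⟨c, d⟩
  simp_all [pairLe]; omega

-- sorted lists that are permutations are equal (antisymmetric Le)
lemma sorted_perm_unique {α : Type} (Le : α → α → Prop)
    (hanti : ∀ p q, Le p q → Le q p → p = q) :
    ∀ xs ys : List α, List.Perm xs ys → xs.Pairwise Le → ys.Pairwise Le → xs = ys := by
  intro xs
  induction xs with
  | nil => intro ys h _ _; simpa using h.symm.eq_nil ▸ rfl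
  | cons x xs ih =>
    intro ys h hx hy
    cases ys with
    | nil => simpa using h.eq_nil
    | cons y ys =>
      by_cases hxy : x = y
      · subst hxy
        have := ih ys (h.cons_inv) hx.tail hy.tail
        rw [this]
      · have hxm : x ∈ y :: ys := h.mem_iff.mp (List.mem_cons_self)
        have hym : y ∈ x :: xs := h.symm.mem_iff.mp (List.mem_cons_self)
        have hx' : x ∈ ys := by cases hxm with | head => exact absurd rfl hxy | tail _ h => exact h
        have hy' : y ∈ xs := by
          cases hym with | head => exact absurd rfl (fun e => hxy e.symm) | tail _ h => exact h
        have h1 : Le x y := (List.pairwise_cons.mp hx).1 y hy'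
        have h2 : Le y x := (List.pairwise_cons.mp hy).1 x hx'
        exact absurd (hanti _ _ h1 h2) hxy

-- getD-monotonicity of a Pairwise list
lemma pairwise_getD {α : Type} (Le : α → α → Prop) (hrefl : ∀ p, Le p p)
    (l : List α) (d : α) (h : l.Pairwise Le) :
    ∀ k m : Nat, k ≤ m → m < l.length → Le (l.getD k d) (l.getD m d) := by
  intro k m hkm hm
  rcases Nat.eq_or_lt_of_le hkm with rfl | hlt
  · exact hrefl _
  · have hk : k < l.length := lt_trans hlt hm
    rw [List.getD_eq_getElem l d hk, List.getD_eq_getElem l d hm]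
    exact List.pairwise_iff_getElem.mp h k m hk hm hlt

-- ---- generic insort lemmas ----
lemma insortIdx_spec {α : Type} (lt : α → α → Bool) (Le : α → α → Prop)
    (hfl : ∀ p q, lt q p = false ↔ Le p q)
    (htrans : ∀ p q r, Le p q → Le q r → Le p r)
    (hirr : ∀ p, lt p p = false)
    (a : List α) (d item : α) (ha : a.Pairwise Le) :
    ∀ n lo hi, hi - lo ≤ n → lo ≤ hi → hi ≤ a.length →
    (∀ k, k < lo → lt (a.getD k d) item = true) →
    (∀ k, hi ≤ k → k < a.length → lt (a.getD k d) item = false) →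
    insortIdx lt a d item lo hi ≤ a.length ∧
    (∀ k, k < insortIdx lt a d item lo hi → lt (a.getD k d) item = true) ∧
    (∀ k, insortIdx lt a d item lo hi ≤ k → k < a.length → lt (a.getD k d) item = false) := by
  -- monotone transfer: Le p q and lt q item → lt p item ; lt q item = false → lt p... 
  have hstep : ∀ p q, Le p q → lt q item = true → lt p item = true := by
    intro p q hpq hq
    by_contra hcon
    have hp : lt p item = false := by revert hcon; cases h : lt p item <;> simp
    have : Le item p := (hfl _ _).mp hp
    have : Le item q := htrans _ _ _ this hpq
    rw [← hfl _ _] at this; rw [this] at hq; exact Bool.false_ne_true hq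
  have hstep2 : ∀ p q, Le p q → lt p item = false → lt q item = false := by
    intro p q hpq hp
    have : Le item p := (hfl _ _).mp hp
    exact (hfl _ _).mpr (htrans _ _ _ this hpq)
  have hrefl : ∀ p, Le p p := fun p => (hfl p p).mp (hirr p)
  intro n
  induction n with
  | zero =>
    intro lo hi hn hlohi hhi h1 h2
    have : lo = hi := by omega
    subst this
    rw [insortIdx]; simp only [lt_irrefl, if_false]
    exact ⟨hhi, h1, h2⟩
  | succ n ih =>
    intro lo hi hn hlohi hhi h1 h2
    rw [insortIdx]
    by_cases hlt : lo < hi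
    · simp only [hlt, if_true]
      set m := (lo + hi) / 2 with hm
      by_cases hc : lt (a.getD m d) item = true
      · simp only [hc, if_true]
        refine ih (m + 1) hi (by omega) (by omega) hhi ?_ h2
        intro k hk
        rcases Nat.lt_or_ge k lo with h | h
        · exact h1 k h
        · exact hstep _ _ (pairwise_getD Le hrefl a d ha k m (by omega) (by omega)) hc
      · have hc' : lt (a.getD m d) item = false := by revert hc; cases h : lt (a.getD m d) item <;> simp
        simp only [hc, if_false]
        refine ih lo m (by omega) (by omega) (by omega) h1 ?_
        intro k hk hk2
        exact hstep2 _ _ (pairwise_getD Le hrefl a d ha m k hk (by omega)) hc'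
    · simp only [hlt, if_false]
      exact ⟨by omega, fun k hk => h1 k (by omega), fun k hk hk2 => h2 k (by omega) hk2⟩

lemma insortBy_spec {α : Type} (lt : α → α → Bool) (Le : α → α → Prop)
    (hfl : ∀ p q, lt q p = false ↔ Le p q)
    (htrans : ∀ p q r, Le p q → Le q r → Le p r)
    (hirr : ∀ p, lt p p = false)
    (htot : ∀ p q, Le p q ∨ Le q p)
    (d : α) (a : List α) (item : α) (ha : a.Pairwise Le) :
    List.Perm (insortBy lt d a item) (item :: a) ∧ (insortBy lt d a item).Pairwise Le := by
  obtain ⟨hle, hbelow, habove⟩ :=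
    insortIdx_spec lt Le hfl htrans hirr a d item ha a.length 0 a.length (by omega) (by omega)
      (le_refl _) (by omega) (fun k hk hk2 => by omega)
  set j := insortIdx lt a d item 0 a.length with hj
  have hins : insortBy lt d a item = a.take j ++ item :: a.drop j := by
    rw [insortBy, ← hj, PySem.List.insert_natCast a j item hle]
  rw [hins]
  constructor
  · exact List.perm_middle.trans (by rw [List.take_append_drop])
  · -- sortedness
    have hta : (a.take j ++ a.drop j).Pairwise Le := by rw [List.take_append_drop]; exact ha
    rw [List.pairwise_append] at hta
    obtain ⟨ht, hd, hcross⟩ := hta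
    rw [List.pairwise_append]
    refine ⟨ht, ?_, ?_⟩
    · rw [List.pairwise_cons]
      refine ⟨?_, hd⟩
      intro y hy
      obtain ⟨k, hk, rfl⟩ := List.getElem_of_mem hy
      rw [List.getElem_drop]
      have := habove (j + k) (by omega) (by have := hk; simp [List.length_drop] at this; omega)
      rw [← List.getD_eq_getElem a d (by have := hk; simp [List.length_drop] at this; omega)]
      exact (hfl _ _).mp this
    · intro x hx y hy
      obtain ⟨k, hk, rfl⟩ := List.getElem_of_mem hx
      have hkj : k < j := by have := hk; simp [List.length_take] at this; omega
      have hkl : k < a.length := by have := hle; omega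
      have hxv : (a.take j)[k] = a.getD k d := by
        rw [List.getElem_take, List.getD_eq_getElem a d hkl]
      rcases List.mem_cons.mp hy with hy1 | hy'
      · rw [hy1]
        rcases htot ((a.take j)[k]) item with h | h
        · exact h
        · exfalso
          have hf : lt (a.getD k d) item = false := (hfl _ _).mpr (hxv ▸ h)
          rw [hbelow k hkj] at hf
          simp at hf
      · obtain ⟨k2, hk2, rfl⟩ := List.getElem_of_mem hy'
        exact hcross _ hx _ hy'

-- ---- gpairs lemmas ----
lemma gpairs_length : ∀ bs : List Int, (gpairs bs).length = bs.length - 1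
  | [] => rfl
  | [_] => rfl
  | _ :: b :: t => by simp [gpairs, gpairs_length (b :: t)]

lemma gpairs_getD : ∀ (bs : List Int) (i : Nat), i + 1 < bs.length →
    (gpairs bs).getD i (0, 0) = (bs.getD i 0 - bs.getD (i + 1) 0, bs.getD i 0)
  | a :: b :: t, 0, _ => by simp [gpairs]
  | a :: b :: t, i + 1, h => by
      have := gpairs_getD (b :: t) i (by simpa using h)
      simpa [gpairs] using this

lemma mem_gpairs_iff : ∀ (bs : List Int) (p : Int × Int),
    p ∈ gpairs bs ↔ ∃ i : Nat, i + 1 < bs.length ∧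
      p = (bs.getD i 0 - bs.getD (i + 1) 0, bs.getD i 0)
  | [], p => by simp [gpairs]
  | [a], p => by simp [gpairs]
  | a :: b :: t, p => by
      rw [gpairs, List.mem_cons, mem_gpairs_iff (b :: t) p]
      constructor
      · rintro (rfl | ⟨i, hi, rfl⟩)
        · exact ⟨0, by simp, by simp⟩
        · exact ⟨i + 1, by simpa using hi, by simp⟩
      · rintro ⟨i, hi, rfl⟩
        cases i with
        | zero => left; simp
        | succ i => right; exact ⟨i, by simpa using hi, by simp⟩

lemma map_snd_gpairs : ∀ bs : List Int, (gpairs bs).map Prod.snd = bs.dropLast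
  | [] => rfl
  | [_] => rfl
  | a :: b :: t => by simp [gpairs, map_snd_gpairs (b :: t)]

lemma gpairs_insert : ∀ (bs : List Int) (i : Nat) (m : Int), i + 1 < bs.length →
    List.Perm (gpairs (bs.take (i + 1) ++ m :: bs.drop (i + 1)))
      ((bs.getD i 0 - m, bs.getD i 0) :: (m - bs.getD (i + 1) 0, m) :: (gpairs bs).eraseIdx i)
  | a :: b :: t, 0, m, _ => by
      simp only [List.take, List.drop, gpairs, List.cons_append, List.nil_append]
      simp [gpairs, List.eraseIdx]
  | a :: b :: t, i + 1, m, h => by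
      have ih := gpairs_insert (b :: t) i m (by simpa using h)
      have hte : (a :: b :: t).take (i + 1 + 1) ++ m :: (a :: b :: t).drop (i + 1 + 1)
          = a :: ((b :: t).take (i + 1) ++ m :: (b :: t).drop (i + 1)) := by
        simp [List.take, List.drop]
      have ht : (b :: t).take (i + 1) ++ m :: (b :: t).drop (i + 1)
          = b :: (t.take i ++ m :: (b :: t).drop (i + 1)) := by simp [List.take]
      rw [hte, ht]
      rw [ht] at ih
      simp only [gpairs, List.getD_cons_succ, List.eraseIdx_cons_succ]
      exact (ih.cons (a - b, a)).trans (List.perm_middle (l₁ := [_, _])).symm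

-- ---- sortedness of the boundary list under midpoint insertion ----
lemma insertAt_pairwise (l : List Int) (j : Nat) (m : Int) (hj : j ≤ l.length)
    (hl : l.Pairwise (· ≤ ·))
    (hlow : ∀ k, k < j → l.getD k 0 ≤ m)
    (hhigh : ∀ k, j ≤ k → k < l.length → m ≤ l.getD k 0) :
    (l.take j ++ m :: l.drop j).Pairwise (· ≤ · : Int → Int → Prop) := by
  have hta : (l.take j ++ l.drop j).Pairwise (· ≤ · : Int → Int → Prop) := by
    rw [List.take_append_drop]; exact hl
  rw [List.pairwise_append] at hta
  obtain ⟨ht, hd, hcross⟩ := hta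
  rw [List.pairwise_append]
  refine ⟨ht, ?_, ?_⟩
  · rw [List.pairwise_cons]
    refine ⟨?_, hd⟩
    intro y hy
    obtain ⟨k, hk, rfl⟩ := List.getElem_of_mem hy
    have hk' : j + k < l.length := by have := hk; simp [List.length_drop] at this; omega
    rw [List.getElem_drop, ← List.getD_eq_getElem l 0 hk']
    exact hhigh (j + k) (by omega) hk'
  · intro x hx y hy
    obtain ⟨k, hk, rfl⟩ := List.getElem_of_mem hx
    have hkj : k < j := by have := hk; simp [List.length_take] at this; omega
    have hkl : k < l.length := by omega
    have hxv : (l.take j)[k] = l.getD k 0 := by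
      rw [List.getElem_take, List.getD_eq_getElem l 0 hkl]
    rcases List.mem_cons.mp hy with hy1 | hy'
    · rw [hy1, hxv]; exact hlow k hkj
    · exact hcross _ hx _ hy'

lemma getLast?_insertAt (l : List Int) (j : Nat) (m : Int) (hj : j < l.length) :
    (l.take j ++ m :: l.drop j).getLast? = l.getLast? := by
  have hne : l.drop j ≠ [] := by
    intro h; have := congrArg List.length h; simp at this; omega
  obtain ⟨z, zs, hzz⟩ : ∃ z zs, l.drop j = z :: zs := by
    cases h : l.drop j with
    | nil => exact absurd h hne
    | cons z zs => exact ⟨z, zs, rfl⟩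
  conv_rhs => rw [← List.take_append_drop j l]
  rw [List.getLast?_append, List.getLast?_append, hzz, List.getLast?_cons_cons]

lemma drop_pred_eq : ∀ (l : List Int), l ≠ [] →
    ∃ a, l.getLast? = some a ∧ l.drop (l.length - 1) = [a]
  | [x], _ => ⟨x, by simp⟩
  | x :: y :: t, _ => by
      obtain ⟨a, h1, h2⟩ := drop_pred_eq (y :: t) (by simp)
      exact ⟨a, by simpa using h1, by simpa using h2⟩

-- ---- characterisation of A's scan ----
lemma aScan_spec (bs : List Int) (hs : bs.Pairwise (· ≤ · : Int → Int → Prop))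
    (hpos : ∃ j : Nat, j + 1 < bs.length ∧ bs.getD j 0 < bs.getD (j + 1) 0) :
    (aScan bs).2 + 1 < bs.length ∧
    bs.getD (aScan bs).2 0 < bs.getD ((aScan bs).2 + 1) 0 ∧
    ∀ p ∈ gpairs bs, pairLe (bs.getD (aScan bs).2 0 - bs.getD ((aScan bs).2 + 1) 0,
                             bs.getD (aScan bs).2 0) p := by
  set G : Nat → Int := fun i => bs.getD (i + 1) 0 - bs.getD i 0 with hG
  set step : (Int × Nat) → Nat → Int × Nat :=
    fun s i => if s.1 < bs.getD (i + 1) 0 - bs.getD i 0 then (bs.getD (i + 1) 0 - bs.getD i 0, i) else s with hstep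
  have hscan : aScan bs = (List.range (bs.length - 1)).foldl step (0, 0) := rfl
  have key : ∀ m : Nat,
      (((List.range m).foldl step (0, 0) = (0, 0) ∧ ∀ j, j < m → G j ≤ 0) ∨
       (((List.range m).foldl step (0, 0)).2 + 1 ≤ m ∧
        ((List.range m).foldl step (0, 0)).1 = G ((List.range m).foldl step (0, 0)).2 ∧
        0 < ((List.range m).foldl step (0, 0)).1 ∧
        (∀ j, j < m → G j ≤ ((List.range m).foldl step (0, 0)).1) ∧
        (∀ j, j < ((List.range m).foldl step (0, 0)).2 →
          G j < ((List.range m).foldl step (0, 0)).1))) := by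
    intro m
    induction m with
    | zero => left; simp
    | succ m ih =>
      rw [List.range_succ, List.foldl_append]
      rcases ih with ⟨he, hall⟩ | ⟨h1, h2, h3, h4, h5⟩
      · rw [he]
        by_cases hc : (0 : Int) < G m
        · right
          rw [hstep]
          simp only [hG] at hc ⊢
          rw [List.foldl_cons, List.foldl_nil, if_pos hc]
          refine ⟨by omega, rfl, hc, ?_, ?_⟩
          · intro j hj
            rcases Nat.lt_succ_iff_lt_or_eq.mp hj with h | rfl
            · exact le_trans (hall j h) (le_of_lt hc)
            · exact le_refl _
          · intro j hj; exact lt_of_le_of_lt (hall j hj) hc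
        · left
          rw [hstep]
          simp only [hG] at hc ⊢
          rw [List.foldl_cons, List.foldl_nil, if_neg (by omega)]
          refine ⟨rfl, ?_⟩
          intro j hj
          rcases Nat.lt_succ_iff_lt_or_eq.mp hj with h | rfl
          · exact hall j h
          · omega
      · set s := (List.range m).foldl step (0, 0) with hsdef
        by_cases hc : s.1 < G m
        · right
          have hst : (List.foldl step s [m]) = (G m, m) := by
            rw [hstep]; simp only [hG] at hc ⊢
            rw [List.foldl_cons, List.foldl_nil, if_pos hc]
          rw [hst]
          refine ⟨by omega, rfl, by omega, ?_, ?_⟩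
          · intro j hj
            rcases Nat.lt_succ_iff_lt_or_eq.mp hj with h | rfl
            · exact le_trans (h4 j h) (le_of_lt hc)
            · exact le_refl _
          · intro j hj
            exact lt_of_le_of_lt (h4 j (by simpa using hj)) hc
        · right
          have hst : (List.foldl step s [m]) = s := by
            rw [hstep]; simp only [hG] at hc ⊢
            rw [List.foldl_cons, List.foldl_nil, if_neg hc]
          rw [hst]
          refine ⟨by omega, h2, h3, ?_, h5⟩
          intro j hj
          rcases Nat.lt_succ_iff_lt_or_eq.mp hj with h | rfl
          · exact h4 j h
          · omega
  obtain ⟨j0, hj0, hj0p⟩ := hpos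
  have hlen : 2 ≤ bs.length := by omega
  rcases key (bs.length - 1) with ⟨_, hall⟩ | ⟨h1, h2, h3, h4, h5⟩
  · exfalso
    have := hall j0 (by omega)
    simp only [hG] at this; omega
  · rw [hscan]
    set s := (List.range (bs.length - 1)).foldl step (0, 0)
    have hi1 : s.2 + 1 < bs.length := by omega
    have hgap : bs.getD s.2 0 < bs.getD (s.2 + 1) 0 := by
      have := h2; simp only [hG] at this; omega
    refine ⟨hi1, hgap, ?_⟩
    intro p hp
    obtain ⟨q, hq, rfl⟩ := (mem_gpairs_iff bs p).mp hp
    have hqle : G q ≤ s.1 := h4 q (by omega)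
    rcases lt_or_eq_of_le hqle with h | h
    · left; simp only [hG] at h h2 ⊢; omega
    · have hqge : s.2 ≤ q := by
        by_contra hcon
        have := h5 q (by omega); omega
      right
      constructor
      · simp only [hG] at h h2; omega
      · exact pairwise_getD (· ≤ ·) (fun p => le_refl p) bs 0 hs s.2 q hqge (by omega)

lemma insertBy_pairwise {α : Type} (before : α → α → Bool) (Le : α → α → Prop)
    (h1 : ∀ x y, before x y = true → Le x y) (h2 : ∀ x y, before x y = false → Le y x)
    (htrans : ∀ p q r, Le p q → Le q r → Le p r) :
    ∀ (acc : List α) (x : α), acc.Pairwise Le →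
      (PySem.List.insertBy before x acc).Pairwise Le := by
  intro acc
  induction acc with
  | nil => intro x _; simp [PySem.List.insertBy]
  | cons y ys ih =>
    intro x hp
    rw [List.pairwise_cons] at hp
    obtain ⟨hy, hys⟩ := hp
    by_cases hc : before x y = true
    · simp only [PySem.List.insertBy, hc, if_true]
      rw [List.pairwise_cons]
      refine ⟨?_, List.pairwise_cons.mpr ⟨hy, hys⟩⟩
      intro z hz
      rcases List.mem_cons.mp hz with rfl | hz'
      · exact h1 _ _ hc
      · exact htrans _ _ _ (h1 _ _ hc) (hy z hz')
    · have hc' : before x y = false := by revert hc; cases h : before x y <;> simp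
      simp only [PySem.List.insertBy, hc', Bool.false_eq_true, if_false]
      rw [List.pairwise_cons]
      refine ⟨?_, ih x hys⟩
      intro z hz
      rcases (PySem.List.mem_insertBy ..).mp hz with rfl | hz'
      · exact h2 _ _ hc'
      · exact hy z hz'

lemma sorted2_pairwise_pairLe (xs : List (Int × Int)) :
    (PySem.List.sorted2 xs Prod.fst Prod.snd false).Pairwise pairLe := by
  have hb1 : ∀ x y : Int × Int,
      (decide (x.1 < y.1) || (!decide (y.1 < x.1) && decide (x.2 < y.2))) = true → pairLe x y := by
    intro x y h; simp at h; simp [pairLe]; omega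
  have hb2 : ∀ x y : Int × Int,
      (decide (x.1 < y.1) || (!decide (y.1 < x.1) && decide (x.2 < y.2))) = false → pairLe y x := by
    intro x y h; simp at h; simp [pairLe]; omega
  have key : ∀ (l acc : List (Int × Int)), acc.Pairwise pairLe →
      (l.foldl (fun acc x => PySem.List.insertBy
        (fun a b => decide (a.1 < b.1) || (!decide (b.1 < a.1) && decide (a.2 < b.2))) x acc)
        acc).Pairwise pairLe := by
    intro l
    induction l with
    | nil => intro acc h; exact h
    | cons x l ih =>
      intro acc h
      rw [List.foldl_cons]
      refine ih _ ?_
      exact insertBy_pairwise _ pairLe hb1 hb2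
        (fun p q r h1 h2 => by rcases h1 with h | ⟨e, h⟩ <;> rcases h2 with g | ⟨f, g⟩ <;>
          simp_all [pairLe] <;> omega) acc x h
  exact key xs []  (List.Pairwise.nil)

lemma gpairs_eq_map_range (bs : List Int) :
    (List.range (bs.length - 1)).map
      (fun i => (bs.getD i 0 - bs.getD (i + 1) 0, bs.getD i 0)) = gpairs bs := by
  apply List.ext_getElem
  · simp [gpairs_length bs]
  · intro k h1 h2
    have hk : k < bs.length - 1 := by simpa using h1
    simp only [List.getElem_map, List.getElem_range]
    have := gpairs_getD bs k (by omega)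
    rw [List.getD_eq_getElem _ _ (by rw [gpairs_length bs]; omega)] at this
    exact this.symm

-- ---- the simulation invariant ----
def SimInv (bs : List Int) (pq : List (Int × Int)) : Prop :=
  bs.Pairwise (· ≤ · : Int → Int → Prop) ∧ 2 ≤ bs.length ∧
  (∃ p ∈ gpairs bs, p.1 < 0) ∧
  pq.Pairwise pairLe ∧ List.Perm pq (gpairs bs)

lemma loop_sim : ∀ (n : Nat) (bs : List Int) (pq : List (Int × Int)) (target : Int),
    SimInv bs pq → (target - ((bs.length : Int) - 1)).toNat = n →
    SimInv (aLoop bs target) (bLoop n pq) ∧ (aLoop bs target).getLast? = bs.getLast? := by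
  intro n
  induction n with
  | zero =>
    intro bs pq target hinv hn
    rw [aLoop, dif_neg (by omega)]
    exact ⟨hinv, rfl⟩
  | succ n ih =>
    intro bs pq target hinv hn
    obtain ⟨hs, hlen, hposex, hpqs, hperm⟩ := hinv
    have hcond : (bs.length : Int) - 1 < target := by omega
    have hpos : ∃ j : Nat, j + 1 < bs.length ∧ bs.getD j 0 < bs.getD (j + 1) 0 := by
      obtain ⟨p, hp, hp1⟩ := hposex
      obtain ⟨j, hj, rfl⟩ := (mem_gpairs_iff bs p).mp hp
      exact ⟨j, hj, by dsimp only at hp1; omega⟩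
    obtain ⟨hi1, hgap, hmin⟩ := aScan_spec bs hs hpos
    set i := (aScan bs).2 with hidef
    set bi := bs.getD i 0 with hbi
    set bi1 := bs.getD (i + 1) 0 with hbi1
    set mid := PySem.Int.floordiv (bi + bi1) 2 with hmid
    have hmb := PySem.Int.floordiv_two_mid_bounds (le_of_lt hgap)
    rw [← hmid] at hmb
    have hmlt : mid < bi1 := by
      rw [hmid, PySem.Int.floordiv_lt_iff_lt_mul (by norm_num)]
      omega
    have hgl : (gpairs bs).length = bs.length - 1 := gpairs_length bs
    have hpql : pq.length = bs.length - 1 := by rw [hperm.length_eq, hgl]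
    cases pq with
    | nil => simp at hpql; omega
    | cons h rest =>
      have hrs : rest.Pairwise pairLe := (List.pairwise_cons.mp hpqs).2
      have hpairI_mem : (bi - bi1, bi) ∈ gpairs bs := (mem_gpairs_iff bs _).mpr ⟨i, hi1, rfl⟩
      have hh : h = (bi - bi1, bi) := by
        have h_in : h ∈ gpairs bs := hperm.mem_iff.mp List.mem_cons_self
        have h1 : pairLe (bi - bi1, bi) h := hmin h h_in
        have h2 : pairLe h (bi - bi1, bi) := by
          have hmem : (bi - bi1, bi) ∈ h :: rest := hperm.mem_iff.mpr hpairI_mem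
          rcases List.mem_cons.mp hmem with heq | hmem'
          · rw [← heq]; exact pairLe_refl _
          · exact (List.pairwise_cons.mp hpqs).1 _ hmem'
        exact pairLe_antisymm h2 h1
      -- B's step computes the same split values
      have hBstep : bLoop (n + 1) (h :: rest)
          = bLoop n (insortBy pyPairLt (0, 0)
              (insortBy pyPairLt (0, 0) rest (bi - mid, bi)) (mid - bi1, mid)) := by
        rw [hh]
        show bLoop n _ = _
        have e1 : bi - (bi - bi1) = bi1 := by ring
        rw [e1]
      -- A's step
      have hins : PySem.List.insert bs ((i : Int) + 1) mid
          = bs.take (i + 1) ++ mid :: bs.drop (i + 1) := by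
        have e : ((i : Int) + 1) = ((i + 1 : Nat) : Int) := by push_cast; ring
        rw [e, PySem.List.insert_natCast bs (i + 1) mid (by omega)]
      have hAstep : aLoop bs target
          = aLoop (bs.take (i + 1) ++ mid :: bs.drop (i + 1)) target := by
        rw [aLoop, dif_pos hcond, ← hins]
      set bs' := bs.take (i + 1) ++ mid :: bs.drop (i + 1) with hbs'
      have hlen' : bs'.length = bs.length + 1 := by
        rw [hbs', List.length_append, List.length_cons, List.length_take, List.length_drop]
        omega
      -- invariant for the new states
      have hs' : bs'.Pairwise (· ≤ · : Int → Int → Prop) := by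
        refine insertAt_pairwise bs (i + 1) mid (by omega) hs ?_ ?_
        · intro k hk
          exact le_trans (pairwise_getD (· ≤ ·) (fun p => le_refl p) bs 0 hs k i (by omega) (by omega)) hmb.1
        · intro k hk1 hk2
          exact le_trans hmb.2 (pairwise_getD (· ≤ ·) (fun p => le_refl p) bs 0 hs (i + 1) k hk1 hk2)
      have hgp' : List.Perm (gpairs bs')
          ((bi - mid, bi) :: (mid - bi1, mid) :: (gpairs bs).eraseIdx i) :=
        gpairs_insert bs i mid hi1
      have hpos' : ∃ p ∈ gpairs bs', p.1 < 0 := by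
        refine ⟨(mid - bi1, mid), ?_, by simp; omega⟩
        exact hgp'.mem_iff.mpr (by simp)
      have hrest : List.Perm rest ((gpairs bs).eraseIdx i) := by
        have hilen : i < (gpairs bs).length := by omega
        have hgetE : (gpairs bs)[i] = (bi - bi1, bi) := by
          have := gpairs_getD bs i hi1
          rwa [List.getD_eq_getElem _ _ hilen] at this
        have hp2 : List.Perm (gpairs bs) ((bi - bi1, bi) :: (gpairs bs).eraseIdx i) := by
          rw [← hgetE]
          exact (List.getElem_cons_eraseIdx_perm hilen).symm
      -- hmm direction
        have := hperm.trans hp2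
        rw [hh] at this
        exact this.cons_inv
      have hq1 := insortBy_spec pyPairLt pairLe pyPairLt_false_iff
        (fun p q r => pairLe_trans) pyPairLt_irrefl pairLe_total (0, 0) rest (bi - mid, bi) hrs
      have hq2 := insortBy_spec pyPairLt pairLe pyPairLt_false_iff
        (fun p q r => pairLe_trans) pyPairLt_irrefl pairLe_total (0, 0)
        (insortBy pyPairLt (0, 0) rest (bi - mid, bi)) (mid - bi1, mid) hq1.2
      have hperm' : List.Perm
          (insortBy pyPairLt (0, 0) (insortBy pyPairLt (0, 0) rest (bi - mid, bi)) (mid - bi1, mid))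
          (gpairs bs') := by
        refine hq2.1.trans ?_
        refine (List.Perm.cons _ hq1.1).trans ?_
        refine ?_
        have hsw : List.Perm ((mid - bi1, mid) :: (bi - mid, bi) :: rest)
            ((bi - mid, bi) :: (mid - bi1, mid) :: rest) := List.Perm.swap _ _ _
        refine hsw.trans ?_
        exact ((hrest.cons _).cons _).trans hgp'.symm
      have hinv' : SimInv bs'
          (insortBy pyPairLt (0, 0) (insortBy pyPairLt (0, 0) rest (bi - mid, bi)) (mid - bi1, mid)) :=
        ⟨hs', by omega, hpos', hq2.2, hperm'⟩
      have hnext : (target - ((bs'.length : Int) - 1)).toNat = n := by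
        rw [hlen']; push_cast; omega
      obtain ⟨hsim, hlast⟩ := ih bs' _ target hinv' hnext
      rw [hAstep, hBstep]
      refine ⟨hsim, ?_⟩
      rw [hlast, hbs']
      exact getLast?_insertAt bs (i + 1) mid (by omega)

-- ===== VERDICT (by name: the statement is the Claim_ definition above) =====
theorem fill_to_target_rows_py_spec : Claim_equal_fill_to_target_rows_py := by
  unfold Claim_equal_fill_to_target_rows_py
  intro boundaries target _hdom hpre
  unfold Spec_fill_to_target_rows_py
  unfold Pre_fill_to_target_rows_py at hpre
  unfold fill_to_target_rows_py fill_to_target_rows_py_alt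
  simp only []
  set bs := PySem.List.sorted (PySem.Set.ofList boundaries) (fun x => x) false with hbs
  have hlen_eq : bs.length = (PySem.Set.ofList boundaries).length := by
    rw [hbs, PySem.List.length_sorted]
  by_cases hneed : target - ((bs.length : Int) - 1) ≤ 0
  · rw [if_pos hneed, aLoop, dif_neg (by omega)]
  · rw [if_neg hneed]
    have hlen2 : 2 ≤ bs.length := by
      rcases hpre with h | h
      · omega
      · exfalso; omega
    have hsort : bs.Pairwise (· < · : Int → Int → Prop) := by
      rw [hbs]; exact PySem.List.sorted_ofList_pairwise_lt boundaries
    have hsle : bs.Pairwise (· ≤ · : Int → Int → Prop) := hsort.imp le_of_lt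
    have hq0sort := sorted2_pairwise_pairLe ((List.range (bs.length - 1)).map
      (fun i => (bs.getD i 0 - bs.getD (i + 1) 0, bs.getD i 0)))
    have hq0perm : List.Perm (PySem.List.sorted2 ((List.range (bs.length - 1)).map
        (fun i => (bs.getD i 0 - bs.getD (i + 1) 0, bs.getD i 0))) Prod.fst Prod.snd false)
        (gpairs bs) := by
      have h := PySem.List.sorted2_perm ((List.range (bs.length - 1)).map
        (fun i => (bs.getD i 0 - bs.getD (i + 1) 0, bs.getD i 0))) Prod.fst Prod.snd false
      exact h.trans (by rw [gpairs_eq_map_range bs])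
    have hpos0 : ∃ p ∈ gpairs bs, p.1 < 0 := by
      refine ⟨(bs.getD 0 0 - bs.getD 1 0, bs.getD 0 0),
        (mem_gpairs_iff bs _).mpr ⟨0, by omega, rfl⟩, ?_⟩
      have h01 : bs.getD 0 0 < bs.getD 1 0 := by
        rw [List.getD_eq_getElem _ _ (by omega), List.getD_eq_getElem _ _ (by omega)]
        exact List.pairwise_iff_getElem.mp hsort 0 1 (by omega) (by omega) (by omega)
      dsimp only; omega
    have hinv : SimInv bs (PySem.List.sorted2 ((List.range (bs.length - 1)).map
        (fun i => (bs.getD i 0 - bs.getD (i + 1) 0, bs.getD i 0))) Prod.fst Prod.snd false) :=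
      ⟨hsle, hlen2, hpos0, hq0sort, hq0perm⟩
    obtain ⟨⟨hsF, hlenF, _hposF, hpqsF, hpermF⟩, hlastF⟩ :=
      loop_sim (target - ((bs.length : Int) - 1)).toNat bs _ target hinv rfl
    set bsF := aLoop bs target with hbsF
    set pqF := bLoop (target - ((bs.length : Int) - 1)).toNat
      (PySem.List.sorted2 ((List.range (bs.length - 1)).map
        (fun i => (bs.getD i 0 - bs.getD (i + 1) 0, bs.getD i 0))) Prod.fst Prod.snd false)
      with hpqF
    have houtperm : List.Perm (PySem.List.sorted (pqF.map Prod.snd) (fun x => x) false)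
        (pqF.map Prod.snd) := PySem.List.sorted_perm _ _ _
    have houtsort : (PySem.List.sorted (pqF.map Prod.snd) (fun x => x) false).Pairwise
        (· ≤ · : Int → Int → Prop) := by
      simpa using PySem.List.sorted_pairwise (pqF.map Prod.snd) (fun x => x)
    have hmsnd : List.Perm (pqF.map Prod.snd) bsF.dropLast := by
      rw [← map_snd_gpairs bsF]
      exact hpermF.map Prod.snd
    have hdl : bsF.dropLast.Pairwise (· ≤ · : Int → Int → Prop) :=
      hsF.sublist (List.dropLast_sublist bsF)
    have houteq : PySem.List.sorted (pqF.map Prod.snd) (fun x => x) false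
        = bsF.dropLast := by
      refine sorted_perm_unique (· ≤ · : Int → Int → Prop)
        (fun p q h1 h2 => le_antisymm h1 h2) _ _ (houtperm.trans hmsnd) houtsort hdl
    have hbne : bs ≠ [] := by intro h; rw [h] at hlen2; simp at hlen2
    obtain ⟨a, hlast, hdrop⟩ := drop_pred_eq bs hbne
    have hFne : bsF ≠ [] := by
      intro h; rw [h] at hlenF; simp at hlenF
    have hFlast : bsF.getLast? = some a := by rw [hlastF, hlast]
    rw [PySem.List.slice_from_neg_one, hdrop, houteq]
    have := List.dropLast_append_getLast hFne
    have hga : bsF.getLast hFne = a := by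
      have := List.getLast?_eq_some_getLast (l := bsF) hFne
      rw [hFlast] at this
      exact (Option.some_injective _ this.symm)
    rw [← hga]
    exact (List.dropLast_append_getLast hFne).symm
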